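-- pv_equiv track=rewrite | github.com/LLNL/Sina | python/tests/jupyter_test.py | _build_pep8_output
-- ===== SOURCE A (Python) =====
-- import collections
--
-- def _build_pep8_output(result):
--     """
--     Build the PEP8 output based on flake8 results.
--
--     Results from both tools conform to the following format:
--
--       <filename>:<line number>:<column number>: <issue code> <issue desc>
--
--     with some issues providing more details in the description within
--     parentheses.
--
--     :param result: output from flake8
--     :returns: list of flake8 output lines by error
--     """
--     # Aggregate individual errors by error
--     _dict = collections.defaultdict(list)
--     for line in str(result).split("\n"):
--         if line:
--             # Preserve only the code and brief description for each issue to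
--             # facilitate aggregating the results.  For example,
--             #
--             #    E501 line too long (178 > 79 characters) -> E501 line too long
--             #    E303 too many blank lines (4) -> E303 too many blank lines
--             parts = line.replace("(", ":").split(":")
--             line_num, col_num, base_issue = parts[1:4]
--
--             # Strip the whitespace around the base <issue code> <description>.
--             #
--             # Also restore the missing colon, stripped above, if the issue
--             # was 'missing whitespace' surrounding a colon.
--             issue = base_issue.strip()
--             key = "{}:'".format(issue) if issue.endswith("after '") else issue
--
--             _dict[key].append("{} ({})".format(line_num, col_num))
--
--     # Build the output as one issue per entry
--     return ["{}: {}".format(k, ", ".join(_dict[k])) for k in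
--             sorted(_dict.keys())]
-- ===== SOURCE B (Python) =====
-- def _parse_line(line):
--     parts = line.replace("(", ":").split(":")
--     line_num, col_num, base_issue = parts[1:4]
--     issue = base_issue.strip()
--     key = "{}:'".format(issue) if issue.endswith("after '") else issue
--     return key, "{} ({})".format(line_num, col_num)
--
--
-- def _build_pep8_output(result):
--     """Sort the parsed (key, value) pairs by key (stably), then emit one
--     output line per contiguous run of equal keys."""
--     pairs = [_parse_line(line) for line in str(result).split("\n") if line]
--     pairs.sort(key=lambda p: p[0])
--     output = []
--     i = 0
--     n = len(pairs)
--     while i < n: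
--         key = pairs[i][0]
--         vals = []
--         while i < n and pairs[i][0] == key:
--             vals.append(pairs[i][1])
--             i += 1
--         output.append("{}: {}".format(key, ", ".join(vals)))
--     return output
-- ===== Notes on version B (the rewrite author's own statement) =====
-- stated objective: alternative
-- what changed: B replaces A's defaultdict(list) aggregation followed by sorted(keys) with a flat parse into (key, value) pairs, a stable sort keyed on the key, and a single linear scan that emits one output line per run of equal keys.
import Mathlib
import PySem

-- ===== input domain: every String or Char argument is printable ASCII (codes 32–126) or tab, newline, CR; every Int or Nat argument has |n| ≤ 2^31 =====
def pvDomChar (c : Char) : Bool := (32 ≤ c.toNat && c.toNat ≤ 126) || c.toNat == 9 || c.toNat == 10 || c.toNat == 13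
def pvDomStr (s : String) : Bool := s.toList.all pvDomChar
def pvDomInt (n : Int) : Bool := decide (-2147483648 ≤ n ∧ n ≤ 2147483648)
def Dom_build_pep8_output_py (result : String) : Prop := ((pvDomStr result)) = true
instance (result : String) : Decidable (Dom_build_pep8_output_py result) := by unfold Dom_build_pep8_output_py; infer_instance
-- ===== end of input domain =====

-- B replaces A's defaultdict aggregation by flat parse → stable sort by key → one grouping scan (alternative structure, similar cost).


-- ===== PORT A =====
-- literal port of A: one pass building a defaultdict(list), then one output line per sorted key.
-- (On a nonempty line whose 'parts[1:4]' does not unpack, Python raises ValueError — excluded by Pre_ below;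
-- the port skips such a line.)
def build_pep8_output_py (result : String) : List String :=
  let d : PySem.Dict String (List String) := ((PySem.Str.split? result "\n").getD []).foldl (fun d line =>
    if line = "" then d else
      match PySem.List.slice ((PySem.Str.split? (PySem.Str.replace line "(" ":") ":").getD []) (some 1) (some 4) with
      | [line_num, col_num, base_issue] =>
          let issue := PySem.Str.strip base_issue
          let key := if PySem.Str.endswith issue "after '" then issue ++ ":'" else issue
          d.modify key [] (· ++ [line_num ++ " (" ++ col_num ++ ")"])
      | _ => d) PySem.Dict.empty
  (PySem.List.sorted d.keys (fun k => k)).map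
    (fun k => k ++ ": " ++ PySem.Str.join ", " (d.getD k []))

-- ===== PORT B =====
-- port of Source B's _parse_line (none = the line is empty / ValueError line, skipped resp. excluded by Pre_)
def pvParseLine? (line : String) : Option (String × String) :=
  if line = "" then none else
    -- the three-way unpack 'line_num, col_num, base_issue = parts[1:4]' (ValueError = none)
    if (PySem.List.slice ((PySem.Str.split? (PySem.Str.replace line "(" ":") ":").getD []) (some 1) (some 4)).length = 3 then
      let line_num := (PySem.List.slice ((PySem.Str.split? (PySem.Str.replace line "(" ":") ":").getD []) (some 1) (some 4)).getD 0 ""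
      let col_num := (PySem.List.slice ((PySem.Str.split? (PySem.Str.replace line "(" ":") ":").getD []) (some 1) (some 4)).getD 1 ""
      let issue := PySem.Str.strip ((PySem.List.slice ((PySem.Str.split? (PySem.Str.replace line "(" ":") ":").getD []) (some 1) (some 4)).getD 2 "")
      some (if PySem.Str.endswith issue "after '" then issue ++ ":'" else issue,
            line_num ++ " (" ++ col_num ++ ")")
    else none

-- port of Source B's grouping scan over the key-sorted pair list (the two nested while loops)
def pvGroup : List (String × String) → List (String × List String)
  | [] => []
  | (k, v) :: rest =>
      (k, v :: (rest.takeWhile (fun q => q.1 == k)).map (fun q => q.2)) ::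
        pvGroup (rest.dropWhile (fun q => q.1 == k))
  termination_by l => l.length
  decreasing_by
    exact Nat.lt_succ_of_le (List.length_dropWhile_le _ _)

def build_pep8_output_py_alt (result : String) : List String :=
  let pairs := ((PySem.Str.split? result "\n").getD []).filterMap pvParseLine?
  (pvGroup (PySem.List.sorted pairs (fun p => p.1))).map
    (fun g => g.1 ++ ": " ++ PySem.Str.join ", " g.2)

-- ===== PRECONDITION & SPEC =====
-- Pre_ excludes exactly the inputs where A raises ValueError: a nonempty line with fewer than three
-- ':' characters after '(' → ':' replacement, so 'parts[1:4]' does not unpack into three values.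
def Pre_build_pep8_output_py (result : String) : Prop :=
  (((PySem.Str.split? result "\n").getD []).all (fun line =>
    line == "" || decide (3 ≤ PySem.Str.count line ":" + PySem.Str.count line "("))) = true
instance (result : String) : Decidable (Pre_build_pep8_output_py result) := by
  unfold Pre_build_pep8_output_py; infer_instance

def pvWitness_build_pep8_output_py : String := "a.py:1:2: E501 line too long (99 > 79 characters)"

def Spec_build_pep8_output_py (result : String) (out : List String) : Prop := out = build_pep8_output_py_alt result
instance (result : String) (out : List String) : Decidable (Spec_build_pep8_output_py result out) := by unfold Spec_build_pep8_output_py; infer_instance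

-- ===== CLAIM (what is proved, stated in full; the proofs are below) =====
def Claim_equal_build_pep8_output_py : Prop := ∀ (result : String), Dom_build_pep8_output_py result → Pre_build_pep8_output_py result → Spec_build_pep8_output_py result (build_pep8_output_py result)

-- ===== LEMMAS AND PROOFS =====

-- A's per-line loop body, rephrased through B's line parser
set_option maxHeartbeats 2000000 in
lemma pv_stepA (d : PySem.Dict String (List String)) (line : String) :
    (if line = "" then d else
      match PySem.List.slice ((PySem.Str.split? (PySem.Str.replace line "(" ":") ":").getD []) (some 1) (some 4) with
      | [line_num, col_num, base_issue] =>
          let issue := PySem.Str.strip base_issue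
          let key := if PySem.Str.endswith issue "after '" then issue ++ ":'" else issue
          d.modify key [] (· ++ [line_num ++ " (" ++ col_num ++ ")"])
      | _ => d)
    = match pvParseLine? line with
      | some p => d.modify p.1 [] (· ++ [p.2])
      | none => d := by
  unfold pvParseLine?
  by_cases hl : line = ""
  · rw [if_pos hl, if_pos hl]
  · rw [if_neg hl, if_neg hl]
    cases hs : PySem.List.slice ((PySem.Str.split? (PySem.Str.replace line "(" ":") ":").getD []) (some 1) (some 4) with
    | nil => rfl
    | cons a tl =>
      cases tl with
      | nil => rfl
      | cons b tl2 =>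
        cases tl2 with
        | nil => rfl
        | cons c tl3 =>
          cases tl3 with
          | nil => rfl
          | cons e tl4 => rfl

-- A's dict-building loop over the lines is the dict fold over the parsed pairs
lemma pv_foldA_eq (lines : List String) (d : PySem.Dict String (List String)) :
    lines.foldl (fun d line =>
      if line = "" then d else
        match PySem.List.slice ((PySem.Str.split? (PySem.Str.replace line "(" ":") ":").getD []) (some 1) (some 4) with
        | [line_num, col_num, base_issue] =>
            let issue := PySem.Str.strip base_issue
            let key := if PySem.Str.endswith issue "after '" then issue ++ ":'" else issue
            d.modify key [] (· ++ [line_num ++ " (" ++ col_num ++ ")"])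
        | _ => d) d
    = (lines.filterMap pvParseLine?).foldl
        (fun d p => d.modify p.1 [] (· ++ [p.2])) d := by
  induction lines generalizing d with
  | nil => rfl
  | cons line lines ih =>
    rw [List.foldl_cons, List.filterMap_cons, pv_stepA d line]
    cases hp : pvParseLine? line with
    | none => exact ih d
    | some p => exact ih _

lemma pv_contains_eq_false {α : Type} [BEq α] [LawfulBEq α] {s : List α} {x : α}
    (h : x ∉ s) : PySem.Set.contains s x = false := by
  cases hc : PySem.Set.contains s x with
  | false => rfl
  | true => exact absurd ((PySem.Set.contains_iff s x).mp hc) h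

lemma pv_add_of_mem {α : Type} [BEq α] [LawfulBEq α] {s : List α} {x : α}
    (h : x ∈ s) : PySem.Set.add s x = s := by
  simp only [PySem.Set.add]
  rw [if_pos ((PySem.Set.contains_iff s x).mpr h)]

-- the Set.ofList fold absorbs elements already present
lemma pv_foldl_add_absorb {α : Type} [BEq α] [LawfulBEq α] (l : List α) (s : List α)
    (h : ∀ x ∈ l, x ∈ s) : l.foldl PySem.Set.add s = s := by
  induction l generalizing s with
  | nil => rfl
  | cons x l ih =>
    rw [List.foldl_cons, pv_add_of_mem (h x (by simp))]
    exact ih s (fun y hy => h y (by simp [hy]))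

lemma pv_add_cons_of_ne {α : Type} [BEq α] [LawfulBEq α] (s : List α) (a x : α)
    (hne : a ≠ x) : PySem.Set.add (a :: s) x = a :: PySem.Set.add s x := by
  by_cases hm : x ∈ s
  · rw [pv_add_of_mem hm, pv_add_of_mem (by simp [hm])]
  · have h1 : PySem.Set.contains s x = false := pv_contains_eq_false hm
    have h2 : PySem.Set.contains (a :: s) x = false :=
      pv_contains_eq_false (by simp [hm, Ne.symm hne])
    simp only [PySem.Set.add, h1, h2, Bool.false_eq_true, if_neg, not_false_iff]
    rfl

lemma pv_foldl_add_cons' {α : Type} [BEq α] [LawfulBEq α] (l : List α) (s : List α) (a : α)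
    (h : a ∉ l) : l.foldl PySem.Set.add (a :: s) = a :: l.foldl PySem.Set.add s := by
  induction l generalizing s with
  | nil => rfl
  | cons x l ih =>
    rw [List.foldl_cons, List.foldl_cons,
      pv_add_cons_of_ne s a x (fun e => h (by simp [e]))]
    exact ih (PySem.Set.add s x) (fun hy => h (by simp [hy]))

-- dedup of k :: (all-k block ++ tail without k)
lemma pv_ofList_cons_absorb {α : Type} [BEq α] [LawfulBEq α] (k : α) (l1 l2 : List α)
    (h1 : ∀ x ∈ l1, x = k) (h2 : k ∉ l2) :
    PySem.Set.ofList (k :: (l1 ++ l2)) = k :: PySem.Set.ofList l2 := by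
  calc PySem.Set.ofList (k :: (l1 ++ l2))
      = (l1 ++ l2).foldl PySem.Set.add [k] := by
        simp [PySem.Set.ofList]
    _ = l2.foldl PySem.Set.add [k] := by
        rw [List.foldl_append, pv_foldl_add_absorb l1 [k] (fun x hx => by simp [h1 x hx])]
    _ = k :: l2.foldl PySem.Set.add [] := pv_foldl_add_cons' l2 [] k h2
    _ = k :: PySem.Set.ofList l2 := rfl

lemma pv_ofList_sublist {α : Type} [BEq α] (l : List α) : List.Sublist (PySem.Set.ofList l) l := by
  have key : ∀ (l s : List α), List.Sublist (l.foldl PySem.Set.add s) (s ++ l) := by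
    intro l
    induction l with
    | nil => intro s; simp
    | cons x l ih =>
      intro s
      have h1 := ih (PySem.Set.add s x)
      have h2 : List.Sublist (PySem.Set.add s x ++ l) (s ++ x :: l) := by
        by_cases hc : PySem.Set.contains s x = true
        · simp only [PySem.Set.add]
          rw [if_pos hc]
          exact (List.append_sublist_append_left s).mpr (List.sublist_cons_self x l)
        · simp only [PySem.Set.add]
          rw [if_neg hc, List.append_assoc, List.singleton_append]
      rw [List.foldl_cons]
      exact h1.trans h2
  simpa using key l []

-- stability of the sort: the elements with a fixed key keep their order
lemma pv_insertBy_filter {α : Type} (key : α → String) (x : α) (ys : List α) (k : String)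
    (hp : ys.Pairwise (fun a b => key a ≤ key b)) :
    (PySem.List.insertBy (fun a b => decide (key a < key b)) x ys).filter
        (fun p => key p == k)
      = if key x == k then ys.filter (fun p => key p == k) ++ [x]
        else ys.filter (fun p => key p == k) := by
  induction ys with
  | nil =>
    by_cases hx : (key x == k) = true <;>
      simp [PySem.List.insertBy, hx]
  | cons y ys ih =>
    rcases List.pairwise_cons.mp hp with ⟨hy, hys⟩
    by_cases hlt : key x < key y
    · have hcons : PySem.List.insertBy (fun a b => decide (key a < key b)) x (y :: ys)
          = x :: y :: ys := by
        simp [PySem.List.insertBy, hlt]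
      rw [hcons]
      by_cases hx : (key x == k) = true
      · have hxk : key x = k := eq_of_beq hx
        have hnil : (y :: ys).filter (fun p => key p == k) = [] := by
          apply List.filter_eq_nil_iff.mpr
          intro e he
          rcases List.mem_cons.mp he with rfl | he'
          · have : k < key e := hxk ▸ hlt
            simp [(ne_of_lt this).symm]
          · have : k < key e := lt_of_lt_of_le (hxk ▸ hlt) (hy e he')
            simp [(ne_of_lt this).symm]
        simp [hx, hnil]
      · simp [List.filter_cons, hx]
    · have hcons : PySem.List.insertBy (fun a b => decide (key a < key b)) x (y :: ys)
          = y :: PySem.List.insertBy (fun a b => decide (key a < key b)) x ys := by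
        simp [PySem.List.insertBy, hlt]
      rw [hcons, List.filter_cons, List.filter_cons, ih hys]
      by_cases hyk : (key y == k) = true <;> by_cases hx : (key x == k) = true <;>
        simp [hyk, hx]

lemma pv_sorted_filter {α : Type} (key : α → String) (xs : List α) (k : String) :
    (PySem.List.sorted xs key).filter (fun p => key p == k)
      = xs.filter (fun p => key p == k) := by
  rw [PySem.List.sorted_eq_foldl_insertBy]
  induction xs using List.reverseRecOn with
  | nil => rfl
  | append_singleton ys x ih =>
    rw [List.foldl_append, List.foldl_cons, List.foldl_nil]
    have hp : (ys.foldl (fun acc x => PySem.List.insertBy (fun a b => decide (key a < key b)) x acc) []).Pairwise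
        (fun a b => key a ≤ key b) := by
      rw [← PySem.List.sorted_eq_foldl_insertBy]
      exact PySem.List.sorted_pairwise ys key
    rw [pv_insertBy_filter key x _ k hp, List.filter_append, ih]
    by_cases hx : (key x == k) = true <;> simp [hx]

-- everything after the equal-key block has a different key
lemma pv_dropWhile_ne (k : String) (v : String) (rest : List (String × String))
    (hp : ((k, v) :: rest).Pairwise (fun a b => a.1 ≤ b.1)) :
    ∀ q ∈ rest.dropWhile (fun q => q.1 == k), q.1 ≠ k := by
  induction rest with
  | nil => simp
  | cons r rs ih =>
    rcases List.pairwise_cons.mp hp with ⟨hhead, htail⟩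
    rcases List.pairwise_cons.mp htail with ⟨hr, hrs⟩
    by_cases hc : (r.1 == k) = true
    · rw [List.dropWhile_cons_of_pos (p := fun q => q.1 == k) (l := rs) hc]
      apply ih
      exact List.pairwise_cons.mpr ⟨fun q hq => hhead q (by simp [hq]), hrs⟩
    · rw [List.dropWhile_cons_of_neg (p := fun q => q.1 == k) (l := rs) hc]
      intro q hq
      have hrk : r.1 ≠ k := by simpa using hc
      have hkr : k ≤ r.1 := hhead r (by simp)
      rcases List.mem_cons.mp hq with rfl | hq'
      · exact hrk
      · have h1 : r.1 ≤ q.1 := hr q hq'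
        have : k < q.1 := lt_of_lt_of_le (lt_of_le_of_ne hkr (Ne.symm hrk)) h1
        exact Ne.symm (ne_of_lt this)

-- grouping a key-sorted list = one entry per first key occurrence, values by filter
lemma pv_group_eq (qs : List (String × String))
    (hp : qs.Pairwise (fun a b => a.1 ≤ b.1)) :
    pvGroup qs = (PySem.List.dedup (qs.map (fun p => p.1))).map
      (fun k => (k, (qs.filter (fun p => p.1 == k)).map (fun p => p.2))) := by
  induction qs using pvGroup.induct with
  | case1 => simp only [pvGroup]; rfl
  | case2 k v rest ih =>
    have htk : ∀ q ∈ rest.takeWhile (fun q => q.1 == k), q.1 = k :=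
      fun q hq => eq_of_beq (List.mem_takeWhile_imp (p := fun q : String × String => q.1 == k) hq)
    have hdr : ∀ q ∈ rest.dropWhile (fun q => q.1 == k), q.1 ≠ k := pv_dropWhile_ne k v rest hp
    have hrest : rest = rest.takeWhile (fun q => q.1 == k) ++ rest.dropWhile (fun q => q.1 == k) :=
      (List.takeWhile_append_dropWhile).symm
    have hdedup : PySem.List.dedup (((k, v) :: rest).map (fun p => p.1))
        = k :: PySem.List.dedup ((rest.dropWhile (fun q => q.1 == k)).map (fun p => p.1)) := by
      rw [PySem.List.dedup_eq_ofList, PySem.List.dedup_eq_ofList, List.map_cons]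
      conv_lhs => rw [hrest]
      rw [List.map_append]
      exact pv_ofList_cons_absorb k _ _
        (fun x hx => by rcases List.mem_map.mp hx with ⟨q, hq, rfl⟩; exact htk q hq)
        (fun hk => by rcases List.mem_map.mp hk with ⟨q, hq, he⟩; exact hdr q hq he)
    have hfiltk : ((((k, v) : String × String) :: rest).filter (fun p => p.1 == k)).map (fun p => p.2)
        = v :: (rest.takeWhile (fun q => q.1 == k)).map (fun q => q.2) := by
      rw [List.filter_cons_of_pos (p := fun p : String × String => p.1 == k) (by simp)]
      rw [List.map_cons]
      congr 1
      conv_lhs => rw [hrest]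
      rw [List.filter_append,
        List.filter_eq_self.mpr (fun q hq => by simp [htk q hq]),
        List.filter_eq_nil_iff.mpr (fun q hq => by simp [hdr q hq]),
        List.append_nil]
    have hpd : (rest.dropWhile (fun q => q.1 == k)).Pairwise (fun a b => a.1 ≤ b.1) :=
      (List.pairwise_cons.mp hp).2.sublist (List.dropWhile_sublist _)
    simp only [pvGroup]
    rw [hdedup, List.map_cons, ih hpd, ← hfiltk]
    congr 1
    apply List.map_congr_left
    intro k' hk'
    have hk'mem : k' ∈ (rest.dropWhile (fun q => q.1 == k)).map (fun p => p.1) := by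
      rw [PySem.List.dedup_eq_ofList] at hk'
      exact (PySem.Set.mem_ofList _ _).mp hk'
    rcases List.mem_map.mp hk'mem with ⟨q0, hq0, rfl⟩
    have hk'k : q0.1 ≠ k := hdr q0 hq0
    congr 1
    rw [List.filter_cons_of_neg (p := fun p : String × String => p.1 == q0.1) (a := ((k, v) : String × String)) (by simp [Ne.symm hk'k])]
    conv_rhs => rw [hrest, List.filter_append]
    rw [(List.filter_eq_nil_iff (l := rest.takeWhile (fun q => q.1 == k))).mpr
        (fun q hq => by simp [htk q hq, Ne.symm hk'k]),
      List.nil_append]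

-- the sorted distinct keys are the first key occurrences of the sorted pair list
lemma pv_sorted_keys_eq (ps : List (String × String)) :
    PySem.List.sorted (PySem.Set.ofList (ps.map (fun p => p.1))) (fun k => k)
      = PySem.List.dedup ((PySem.List.sorted ps (fun p => p.1)).map (fun p => p.1)) := by
  have h1 : ((PySem.List.sorted ps (fun p => p.1)).map (fun p => p.1)).Pairwise (· ≤ ·) :=
    List.pairwise_map.mpr (PySem.List.sorted_pairwise ps (fun p => p.1))
  have hsub : List.Sublist (PySem.List.dedup ((PySem.List.sorted ps (fun p => p.1)).map (fun p => p.1)))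
      ((PySem.List.sorted ps (fun p => p.1)).map (fun p => p.1)) := by
    rw [PySem.List.dedup_eq_ofList]; exact pv_ofList_sublist _
  have hnd : (PySem.List.dedup ((PySem.List.sorted ps (fun p => p.1)).map (fun p => p.1))).Nodup := by
    rw [PySem.List.dedup_eq_ofList]; exact PySem.Set.nodup_ofList _
  have hlt : (PySem.List.dedup ((PySem.List.sorted ps (fun p => p.1)).map (fun p => p.1))).Pairwise (· < ·) := by
    have hle := h1.sublist hsub
    exact (hle.and hnd).imp (fun h => lt_of_le_of_ne h.1 h.2)
  have hperm : (PySem.List.dedup ((PySem.List.sorted ps (fun p => p.1)).map (fun p => p.1))).Perm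
      (PySem.Set.ofList (ps.map (fun p => p.1))) := by
    apply (List.perm_ext_iff_of_nodup hnd (PySem.Set.nodup_ofList _)).mpr
    intro a
    rw [PySem.List.dedup_eq_ofList, PySem.Set.mem_ofList, PySem.Set.mem_ofList]
    exact ((PySem.List.sorted_perm ps (fun p => p.1) false).map (fun p => p.1)).mem_iff
  exact PySem.List.sorted_eq_of_perm_of_pairwise_lt _ _ _ hperm hlt

-- main bridge: dict aggregation output = sort-then-group output
lemma pv_main (ps : List (String × String)) :
    (PySem.List.sorted (PySem.Set.ofList (ps.map (fun p => p.1))) (fun k => k)).map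
      (fun k => k ++ ": " ++ PySem.Str.join ", "
        ((ps.filter (fun p => p.1 == k)).map (fun p => p.2)))
    = (pvGroup (PySem.List.sorted ps (fun p => p.1))).map
        (fun g => g.1 ++ ": " ++ PySem.Str.join ", " g.2) := by
  rw [pv_group_eq _ (PySem.List.sorted_pairwise ps (fun p => p.1)), List.map_map,
    pv_sorted_keys_eq]
  apply List.map_congr_left
  intro k _
  simp only [Function.comp]
  rw [pv_sorted_filter (fun p => p.1) ps k]

-- assembled: A's dict output over any line list = B's sort-and-group output
lemma pv_final (lines : List String) :
    (PySem.List.sorted ((lines.filterMap pvParseLine?).foldl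
        (fun d p => d.modify p.1 [] (· ++ [p.2]))
        (PySem.Dict.empty : PySem.Dict String (List String))).keys (fun k => k)).map
      (fun k => k ++ ": " ++ PySem.Str.join ", "
        (((lines.filterMap pvParseLine?).foldl
            (fun d p => d.modify p.1 [] (· ++ [p.2]))
            (PySem.Dict.empty : PySem.Dict String (List String))).getD k []))
    = (pvGroup (PySem.List.sorted (lines.filterMap pvParseLine?) (fun p => p.1))).map
        (fun g => g.1 ++ ": " ++ PySem.Str.join ", " g.2) := by
  rw [PySem.Dict.keys_foldl_modify_key (lines.filterMap pvParseLine?)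
      (fun p : String × String => p.1) ([] : List String)
      (fun _ p => (· ++ [p.2])) PySem.Dict.empty,
    PySem.Dict.keys_empty, PySem.Set.update_nil_left]
  simp only [PySem.Dict.getD_foldl_modify_append, PySem.Dict.getD_empty, List.nil_append]
  exact pv_main _

-- ===== VERDICT (by name: the statement is the Claim_ definition above) =====
theorem build_pep8_output_py_spec : Claim_equal_build_pep8_output_py := by
  intro result _ _
  show build_pep8_output_py result = build_pep8_output_py_alt result
  unfold build_pep8_output_py build_pep8_output_py_alt
  rw [pv_foldA_eq]
  exact pv_final _
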